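-- pv_equiv track=rewrite | github.com/t1seo/ps_study | selim/level2/42860joystick.py | setMoves
-- ===== SOURCE A (Python) =====
-- def setMoves(name):
--     moves = []
--     upkey = 	{'A': 0, 'B': 1, 'C': 2, 'D': 3, 'E': 4, 'F': 5, 'G': 6, 'H': 7, 'I': 8, 'J': 9, 'K': 10, 'L': 11, 'M': 12}
--     downkey = 	{0: 0, 'Z': 1, 'Y': 2, 'X': 3, 'W': 4, 'V': 5, 'U': 6, 'T': 7, 'S': 8, 'R': 9, 'Q': 10, 'P': 11, 'O': 12, 'N': 13}
--     for i in name: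
--         if i in upkey:
--             moves.append(upkey[i])
--         else :
--             moves.append(downkey[i])
--     return moves
-- ===== SOURCE B (Python) =====
-- def setMoves(name):
--     moves = []
--     for c in name:
--         moves.append(_dist(c))
--     return moves
--
-- def _dist(c):
--     # Bidirectional walk: step two cursors from the start letter forward and backward
--     # around the 26-letter wheel until one reaches c; the step count is
--     # the minimal vertical press count. Non-letters are never reached
--     # within a full lap, so they raise KeyError like A's dict lookup.
--     target = ord(c)
--     fwd = bwd = ord('A')
--     for steps in range(27):
--         if fwd == target or bwd == target:
--             return steps
--         fwd = ord('A') + (fwd - ord('A') + 1) % 26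
--         bwd = ord('A') + (bwd - ord('A') - 1) % 26
--     raise KeyError(c)
-- ===== Notes on version B (the rewrite author's own statement) =====
-- stated objective: alternative
-- what changed: Replaces the two hand-written lookup dictionaries by a bidirectional walk simulation: two cursors step from the first letter forward and backward around the 26-letter wheel until one hits the character, and the step count is the answer.
import Mathlib
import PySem

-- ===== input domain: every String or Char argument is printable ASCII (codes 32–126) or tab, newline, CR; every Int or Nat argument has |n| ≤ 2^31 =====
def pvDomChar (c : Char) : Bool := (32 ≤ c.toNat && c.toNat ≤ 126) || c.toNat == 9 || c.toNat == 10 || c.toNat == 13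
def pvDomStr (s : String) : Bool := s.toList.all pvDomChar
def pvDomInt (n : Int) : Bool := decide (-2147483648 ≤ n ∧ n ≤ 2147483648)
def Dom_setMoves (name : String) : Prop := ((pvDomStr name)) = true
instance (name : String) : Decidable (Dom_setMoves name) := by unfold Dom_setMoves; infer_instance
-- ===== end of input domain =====

-- B replaces A's two lookup dictionaries by a bidirectional walk around the letter wheel (alternative algorithm, same results).


-- ===== PORT A =====
def upkeyA : PySem.Dict Char Int := PySem.Dict.ofList
  [('A',0),('B',1),('C',2),('D',3),('E',4),('F',5),('G',6),('H',7),('I',8),('J',9),('K',10),('L',11),('M',12)]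
-- A's downkey also carries the integer key 0 (value 0); a one-character string never equals an int in Python,
-- so that entry can never match a loop character and is omitted from the Char-keyed port.
def downkeyA : PySem.Dict Char Int := PySem.Dict.ofList
  [('Z',1),('Y',2),('X',3),('W',4),('V',5),('U',6),('T',7),('S',8),('R',9),('Q',10),('P',11),('O',12),('N',13)]
-- downkey[i] on a missing key raises KeyError in Python: Pre_ excludes exactly those inputs, so the getD default 0 is never used there.
def setMoves (name : String) : List Int :=
  name.toList.foldl
    (fun moves c =>
      if upkeyA.contains c then moves ++ [upkeyA.getD c 0]
      else moves ++ [downkeyA.getD c 0]) []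

-- ===== PORT B =====
-- The for-steps-in-range(27) loop of _dist, as fuel recursion; running out of fuel raises KeyError
-- in Python (outside Pre_), the port returns 0 there only to be total.
def distWalkB (target : Int) : Nat → Int → Int → Int → Int
  | 0, _, _, _ => 0
  | fuel + 1, fwd, bwd, steps =>
    if fwd = target ∨ bwd = target then steps
    else distWalkB target fuel (65 + PySem.Int.mod (fwd - 65 + 1) 26)
                               (65 + PySem.Int.mod (bwd - 65 - 1) 26) (steps + 1)

def distB (c : Char) : Int := distWalkB (c.toNat : Int) 27 65 65 0

def setMoves_alt (name : String) : List Int :=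
  name.toList.foldl (fun moves c => moves ++ [distB c]) []

-- ===== PRECONDITION & SPEC =====
-- Pre_ excludes exactly the inputs containing a character outside the 26 uppercase letters, on which A raises KeyError.
def Pre_setMoves (name : String) : Prop := name.toList.all (fun c => 65 ≤ c.toNat && c.toNat ≤ 90) = true
instance (name : String) : Decidable (Pre_setMoves name) := by unfold Pre_setMoves; infer_instance
def pvWitness_setMoves : String := "AZ"
def Spec_setMoves (name : String) (out : List Int) : Prop := out = setMoves_alt name
instance (name : String) (out : List Int) : Decidable (Spec_setMoves name out) := by unfold Spec_setMoves; infer_instance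

-- ===== CLAIM (what is proved, stated in full; the proofs are below) =====
def Claim_equal_setMoves : Prop := ∀ (name : String), Dom_setMoves name → Pre_setMoves name → Spec_setMoves name (setMoves name)

-- ===== LEMMAS AND PROOFS =====
lemma char_beq_toNat (c d : Char) : (c == d) = (c.toNat == d.toNat) := by
  by_cases h : c = d
  · subst h; simp
  · have hne : c.toNat ≠ d.toNat := fun he => h (Char.ext (UInt32.toNat_inj.mp he))
    simp [h, hne]

lemma step_eq_dist (c : Char) (h1 : 65 ≤ c.toNat) (h2 : c.toNat ≤ 90) :
    (if upkeyA.contains c then upkeyA.getD c 0 else downkeyA.getD c 0) = distB c := by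
  simp only [distB, upkeyA, downkeyA, PySem.Dict.ofList, PySem.Dict.contains,
    PySem.Dict.getD, PySem.Dict.get?]
  simp only [char_beq_toNat]
  generalize c.toNat = n at *
  interval_cases n <;> decide

-- ===== VERDICT (by name: the statement is the Claim_ definition above) =====
theorem setMoves_spec : Claim_equal_setMoves := by
  intro name _ hpre
  have hpre' : ∀ c ∈ name.toList, 65 ≤ c.toNat ∧ c.toNat ≤ 90 := by
    intro c hc
    have := List.all_eq_true.mp hpre c hc
    simpa using this
  show setMoves name = setMoves_alt name
  unfold setMoves setMoves_alt
  apply PySem.List.foldl_congr_mem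
  intro moves c hc
  rcases hpre' c hc with ⟨h1, h2⟩
  rw [← step_eq_dist c h1 h2]
  split <;> rfl
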